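-- pv_equiv track=rewrite | github.com/JonathanHaudenschild/SCC_Schichtplan_Algorithmus | data_transformation.py | calculate_total_shift_capacity
-- ===== SOURCE A (Python) =====
-- def calculate_total_shift_capacity(shift_type_dict, shift_capacity_dict):
--     """
--     Calculate total shift capacity for each shift type.
--
--     Args:
--         shift_type_dict (dict): A dictionary mapping shifts to their types.
--         shift_capacity_dict (dict): A dictionary mapping shifts to their capacities (as tuples).
--
--     Returns:
--         dict: A dictionary with total capacities for each shift type.
--     """
--     shift_types_capacity = {}
--
--     for shift, shift_type in shift_type_dict.items():
--         # Initialize the shift type capacity if it doesn't exist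
--         if shift_type not in shift_types_capacity:
--             shift_types_capacity[shift_type] = [0, 0]  # Changed to a list to allow in-place modification
--
--         # Add the capacity for the shift to the total capacity for its type
--         shift_types_capacity[shift_type][0] += shift_capacity_dict[shift][0]
--         shift_types_capacity[shift_type][1] += shift_capacity_dict[shift][1]
--
--     return shift_types_capacity
-- ===== SOURCE B (Python) =====
-- def calculate_total_shift_capacity(shift_type_dict, shift_capacity_dict):
--     # Two-pass decomposition: first group shifts by their type, then sum
--     # each group's capacities into a fresh [0, 0] total per type.
--     groups = {}
--     for shift, shift_type in shift_type_dict.items():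
--         groups.setdefault(shift_type, []).append(shift)
--
--     totals = {}
--     for shift_type, shifts in groups.items():
--         total = [0, 0]
--         for shift in shifts:
--             total[0] += shift_capacity_dict[shift][0]
--             total[1] += shift_capacity_dict[shift][1]
--         totals[shift_type] = total
--     return totals
-- ===== Notes on version B (the rewrite author's own statement) =====
-- stated objective: alternative
-- what changed: Replaces A's single-pass in-place accumulation into the result dict by a two-pass group-then-reduce decomposition: first an index grouping shifts by type, then a per-group summation into a fresh [0,0] total.
import Mathlib
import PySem

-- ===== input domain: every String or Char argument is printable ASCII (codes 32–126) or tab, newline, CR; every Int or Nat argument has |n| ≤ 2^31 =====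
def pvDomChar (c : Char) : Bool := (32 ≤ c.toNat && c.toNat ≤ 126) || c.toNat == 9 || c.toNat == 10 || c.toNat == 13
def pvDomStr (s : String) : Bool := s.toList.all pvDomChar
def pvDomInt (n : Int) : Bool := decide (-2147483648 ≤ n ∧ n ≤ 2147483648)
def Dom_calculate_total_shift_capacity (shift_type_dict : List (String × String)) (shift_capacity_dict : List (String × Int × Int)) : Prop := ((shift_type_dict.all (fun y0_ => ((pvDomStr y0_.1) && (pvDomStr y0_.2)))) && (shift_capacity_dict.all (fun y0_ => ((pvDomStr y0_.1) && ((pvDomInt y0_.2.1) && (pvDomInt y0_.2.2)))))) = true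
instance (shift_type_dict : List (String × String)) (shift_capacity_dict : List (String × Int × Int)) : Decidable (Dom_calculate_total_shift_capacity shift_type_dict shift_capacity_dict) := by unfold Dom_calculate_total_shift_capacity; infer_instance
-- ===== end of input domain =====

-- B aggregates the same per-type capacity totals by a two-pass group-then-reduce decomposition
-- instead of A's single-pass in-place accumulation; return values are equal (same cost, 'alternative').

-- ===== PORT A =====
-- one fold over shift_type_dict, maintaining the result dict directly;
-- shift_capacity_dict[shift] is getD (Pre_ guarantees the key is present, so the default is never used)
def calculate_total_shift_capacity (shift_type_dict : List (String × String)) (shift_capacity_dict : List (String × Int × Int)) : List (String × List Int) :=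
  (shift_type_dict.foldl
    (fun (acc : PySem.Dict String (List Int)) (p : String × String) =>
      let acc := if acc.contains p.2 then acc else acc.insert p.2 [0, 0]
      let cap := (PySem.Dict.mk shift_capacity_dict).getD p.1 (0, 0)
      acc.modify p.2 [0, 0]
        (fun l => [PySem.List.pyGetD l 0 0 + cap.1, PySem.List.pyGetD l 1 0 + cap.2]))
    PySem.Dict.empty).items

-- ===== PORT B =====
-- pass 1: groups[type] collects the shifts of that type (setdefault+append = modify with default []);
-- pass 2: per group, fold the capacities into a fresh [0,0] total and insert under the type
def calculate_total_shift_capacity_alt (shift_type_dict : List (String × String)) (shift_capacity_dict : List (String × Int × Int)) : List (String × List Int) :=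
  let groups : PySem.Dict String (List String) :=
    shift_type_dict.foldl (fun g p => g.modify p.2 [] (fun l => l ++ [p.1])) PySem.Dict.empty
  (groups.items.foldl
    (fun (totals : PySem.Dict String (List Int)) ts =>
      totals.insert ts.1
        (ts.2.foldl
          (fun (total : List Int) s =>
            let c := (PySem.Dict.mk shift_capacity_dict).getD s (0, 0)
            [PySem.List.pyGetD total 0 0 + c.1, PySem.List.pyGetD total 1 0 + c.2])
          [0, 0]))
    PySem.Dict.empty).items

-- ===== PRECONDITION & SPEC =====
-- Pre_ excludes exactly the inputs on which Python A raises KeyError: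
-- some shift of shift_type_dict has no entry in shift_capacity_dict.  (B raises there too.)
def Pre_calculate_total_shift_capacity (shift_type_dict : List (String × String)) (shift_capacity_dict : List (String × Int × Int)) : Prop :=
  ∀ p ∈ shift_type_dict, p.1 ∈ shift_capacity_dict.map (·.1)
instance (shift_type_dict : List (String × String)) (shift_capacity_dict : List (String × Int × Int)) : Decidable (Pre_calculate_total_shift_capacity shift_type_dict shift_capacity_dict) := by unfold Pre_calculate_total_shift_capacity; infer_instance

def pvWitness_calculate_total_shift_capacity : (List (String × String)) × (List (String × Int × Int)) :=
  ([("early1", "early"), ("late1", "late"), ("early2", "early")],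
   [("early1", (3, 1)), ("late1", (2, 0)), ("early2", (4, 2))])

def Spec_calculate_total_shift_capacity (shift_type_dict : List (String × String)) (shift_capacity_dict : List (String × Int × Int)) (out : List (String × List Int)) : Prop := out = calculate_total_shift_capacity_alt shift_type_dict shift_capacity_dict
instance (shift_type_dict : List (String × String)) (shift_capacity_dict : List (String × Int × Int)) (out : List (String × List Int)) : Decidable (Spec_calculate_total_shift_capacity shift_type_dict shift_capacity_dict out) := by unfold Spec_calculate_total_shift_capacity; infer_instance

-- ===== CLAIM (what is proved, stated in full; the proofs are below) =====
def Claim_equal_calculate_total_shift_capacity : Prop := ∀ (shift_type_dict : List (String × String)) (shift_capacity_dict : List (String × Int × Int)), Dom_calculate_total_shift_capacity shift_type_dict shift_capacity_dict → Pre_calculate_total_shift_capacity shift_type_dict shift_capacity_dict → Spec_calculate_total_shift_capacity shift_type_dict shift_capacity_dict (calculate_total_shift_capacity shift_type_dict shift_capacity_dict)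

-- ===== LEMMAS AND PROOFS =====

-- named copies of the ports' fold bodies (definitionally equal to the inline lambdas)
def pvAddCap (scd : List (String × Int × Int)) (total : List Int) (s : String) : List Int :=
  let c := (PySem.Dict.mk scd).getD s (0, 0)
  [PySem.List.pyGetD total 0 0 + c.1, PySem.List.pyGetD total 1 0 + c.2]

def pvSumTot (scd : List (String × Int × Int)) (shifts : List String) : List Int :=
  shifts.foldl (pvAddCap scd) [0, 0]

def pvStepA (scd : List (String × Int × Int)) (acc : PySem.Dict String (List Int)) (p : String × String) : PySem.Dict String (List Int) :=
  let acc := if acc.contains p.2 then acc else acc.insert p.2 [0, 0]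
  acc.modify p.2 [0, 0] (fun l => pvAddCap scd l p.1)

def pvStepB (g : PySem.Dict String (List String)) (p : String × String) : PySem.Dict String (List String) :=
  g.modify p.2 [] (fun l => l ++ [p.1])

-- "evaluate" a grouping dict: per type, the summed total of its group
def pvEval (scd : List (String × Int × Int)) (g : PySem.Dict String (List String)) : PySem.Dict String (List Int) :=
  PySem.Dict.mk (g.items.map (fun ts => (ts.1, pvSumTot scd ts.2)))

theorem pvModify_eq_insert {ν : Type} (d : PySem.Dict String ν) (k : String) (d0 : ν) (f : ν → ν) :
    d.modify k d0 f = d.insert k (f (d.getD k d0)) := PySem.Dict.ext_iff.mpr rfl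

theorem pvItems_eval (scd : List (String × Int × Int)) (g : PySem.Dict String (List String)) :
    (pvEval scd g).items = g.items.map (fun ts => (ts.1, pvSumTot scd ts.2)) := rfl

theorem pvKeys_eval (scd : List (String × Int × Int)) (g : PySem.Dict String (List String)) :
    (pvEval scd g).keys = g.keys := by
  simp [pvEval, PySem.Dict.keys_mk, List.map_map]
  rfl

theorem pvContains_eval (scd : List (String × Int × Int)) (g : PySem.Dict String (List String)) (k : String) :
    (pvEval scd g).contains k = g.contains k := by
  rw [PySem.Dict.contains_eq_decide_mem_keys, PySem.Dict.contains_eq_decide_mem_keys, pvKeys_eval]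

theorem pvStep_comm (scd : List (String × Int × Int)) (g : PySem.Dict String (List String)) (p : String × String)
    (hnd : g.keys.Nodup) :
    pvStepA scd (pvEval scd g) p = pvEval scd (pvStepB g p) := by
  apply PySem.Dict.ext
  by_cases hc : g.contains p.2 = true
  · -- the type already has an entry: both sides rewrite it in place
    have hsome : (g.get? p.2).isSome := by rw [← PySem.Dict.contains_eq_isSome_get?]; exact hc
    obtain ⟨shifts, hget⟩ := Option.isSome_iff_exists.mp hsome
    have hmem : (p.2, shifts) ∈ g.items := PySem.Dict.mem_items_of_get?_eq_some _ hget
    have hmemE : (p.2, pvSumTot scd shifts) ∈ (pvEval scd g).items := by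
      rw [pvItems_eval]; exact List.mem_map_of_mem hmem
    have hndE : (pvEval scd g).keys.Nodup := by rw [pvKeys_eval]; exact hnd
    have hgE : (pvEval scd g).getD p.2 [0, 0] = pvSumTot scd shifts :=
      PySem.Dict.getD_of_mem_items _ hmemE hndE _
    have hg : g.getD p.2 [] = shifts := PySem.Dict.getD_of_mem_items _ hmem hnd _
    have hcE : (pvEval scd g).contains p.2 = true := by rw [pvContains_eval]; exact hc
    rw [pvStepA, pvStepB, pvModify_eq_insert, pvModify_eq_insert]
    simp only [pvContains_eval scd g p.2, hc, if_pos, hgE, hg]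
    rw [PySem.Dict.items_insert_of_contains _ _ hcE, pvItems_eval, pvItems_eval,
        PySem.Dict.items_insert_of_contains _ _ hc, List.map_map, List.map_map]
    apply List.map_congr_left
    intro ts _
    by_cases hts : ts.1 = p.2
    · simp [Function.comp, hts, pvSumTot, List.foldl_append]
    · simp [Function.comp, hts]
  · -- fresh type: both sides append a new entry
    have hcE : (pvEval scd g).contains p.2 = false := by
      rw [pvContains_eval]; exact Bool.not_eq_true _ ▸ (by simpa using hc)
    rw [pvStepA, pvStepB, pvModify_eq_insert, pvModify_eq_insert]
    simp only [pvContains_eval scd g p.2, hc, if_neg, Bool.false_eq_true, not_false_iff,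
      PySem.Dict.getD_insert_self, PySem.Dict.insert_insert_self]
    rw [PySem.Dict.items_insert_of_not_contains _ _ hcE, pvItems_eval, pvItems_eval,
        PySem.Dict.items_insert_of_not_contains _ _ (by simpa using hc),
        PySem.Dict.getD_of_not_contains _ _ (by simpa using hc : g.contains p.2 = false)]
    simp [pvSumTot]

theorem pvFold_comm (scd : List (String × Int × Int)) (l : List (String × String))
    (g : PySem.Dict String (List String)) (hnd : g.keys.Nodup) :
    l.foldl (pvStepA scd) (pvEval scd g) = pvEval scd (l.foldl pvStepB g) := by
  induction l generalizing g with
  | nil => rfl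
  | cons p t ih =>
    simp only [List.foldl_cons]
    rw [pvStep_comm scd g p hnd]
    refine ih (pvStepB g p) ?_
    have := PySem.Dict.nodup_keys_foldl_modify_key [p] (fun q => q.2) ([] : List String)
      (fun _ q l => l ++ [q.1]) g hnd
    simpa [pvStepB] using this

theorem pvGroups_nodup (l : List (String × String)) :
    (l.foldl pvStepB PySem.Dict.empty).keys.Nodup := by
  have := PySem.Dict.nodup_keys_foldl_modify_key l (fun q => q.2) ([] : List String)
    (fun _ q s => s ++ [q.1]) PySem.Dict.empty (by simp)
  simpa [pvStepB] using this

-- ===== VERDICT (by name: the statement is the Claim_ definition above) =====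
theorem calculate_total_shift_capacity_spec : Claim_equal_calculate_total_shift_capacity := by
  intro std scd _hdom _hpre
  unfold Spec_calculate_total_shift_capacity
  show (std.foldl (pvStepA scd) PySem.Dict.empty).items = _
  have hempty : (PySem.Dict.empty : PySem.Dict String (List Int)) = pvEval scd PySem.Dict.empty := rfl
  rw [hempty, pvFold_comm scd std PySem.Dict.empty (by simp)]
  show (pvEval scd (std.foldl pvStepB PySem.Dict.empty)).items = _
  set groups := std.foldl pvStepB PySem.Dict.empty with hgroups
  show groups.items.map (fun ts => (ts.1, pvSumTot scd ts.2)) = _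
  have hfresh := PySem.Dict.items_foldl_insert_fresh groups.items (fun ts => ts.1)
    (fun ts => pvSumTot scd ts.2) (PySem.Dict.empty : PySem.Dict String (List Int))
    (by intro a _; simp [PySem.Dict.contains_empty])
    (by have := pvGroups_nodup std; rw [← hgroups] at this; exact this)
  show _ = (groups.items.foldl
      (fun (totals : PySem.Dict String (List Int)) ts => totals.insert ts.1 (pvSumTot scd ts.2))
      PySem.Dict.empty).items
  rw [hfresh]
  simp [PySem.Dict.empty]
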